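-- pv_equiv track=rewrite | github.com/VizjereiX/AdventOfCode_2025 | tasks/day_02/part_2.py | looks_shady
-- ===== SOURCE A (Python) =====
-- def looks_shady(shadyStr, partsCount):
--     partLen = len(shadyStr) // partsCount
--     firstPart = shadyStr[0:partLen]
--     for i in range(1, partsCount):
--         testedPart = shadyStr[i*partLen:(i+1)*partLen]
--         if firstPart != testedPart:
--             return False
--     return True
-- ===== SOURCE B (Python) =====
-- def looks_shady(shadyStr, partsCount):
--     partLen = len(shadyStr) // partsCount
--     return shadyStr[:partLen] * partsCount == shadyStr[:partLen * partsCount]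
-- ===== Notes on version B (the rewrite author's own statement) =====
-- stated objective: simpler
-- what changed: Replaces the per-chunk scanning loop with early return by one closed comparison: repeat the first chunk partsCount times and compare with the prefix of length partLen*partsCount.
-- outside the precondition, e.g. on looks_shady('ab', -1): A returns True, B returns False
import Mathlib
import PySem

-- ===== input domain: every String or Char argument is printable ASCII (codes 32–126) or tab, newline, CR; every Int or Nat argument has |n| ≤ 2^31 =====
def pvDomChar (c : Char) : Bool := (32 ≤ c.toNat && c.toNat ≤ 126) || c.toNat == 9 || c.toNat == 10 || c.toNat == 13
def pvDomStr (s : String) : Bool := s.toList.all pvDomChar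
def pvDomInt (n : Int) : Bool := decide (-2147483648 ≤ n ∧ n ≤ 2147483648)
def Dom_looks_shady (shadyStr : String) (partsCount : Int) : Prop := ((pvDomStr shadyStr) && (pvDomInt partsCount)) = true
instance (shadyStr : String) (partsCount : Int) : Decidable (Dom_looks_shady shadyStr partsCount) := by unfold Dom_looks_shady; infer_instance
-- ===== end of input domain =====

-- B replaces A's per-chunk scanning loop by one closed comparison (repeat the first chunk, compare with the prefix); objective: simpler.


-- ===== PORT A =====
def looksShadyGo (s : List Char) (partLen : Int) (firstPart : List Char) : List Int → Bool
  | [] => true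
  | i :: rest =>
    let testedPart := PySem.List.slice s (some (i * partLen)) (some ((i + 1) * partLen))
    if firstPart ≠ testedPart then false
    else looksShadyGo s partLen firstPart rest

def looks_shady (shadyStr : String) (partsCount : Int) : Bool :=
  let partLen := PySem.Int.floordiv (PySem.Str.len shadyStr) partsCount
  let firstPart := PySem.List.slice shadyStr.toList (some 0) (some partLen)
  looksShadyGo shadyStr.toList partLen firstPart (PySem.List.pyRange 1 partsCount 1)

-- ===== PORT B =====
def looks_shady_alt (shadyStr : String) (partsCount : Int) : Bool :=
  let partLen := PySem.Int.floordiv (PySem.Str.len shadyStr) partsCount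
  let firstPart := PySem.List.slice shadyStr.toList none (some partLen)
  (List.replicate partsCount.toNat firstPart).flatten == PySem.List.slice shadyStr.toList none (some (partLen * partsCount))

-- ===== PRECONDITION & SPEC =====
-- Pre_ excludes partsCount ≤ 0: at partsCount = 0 A raises ZeroDivisionError, and a negative
-- parts count is outside the function's natural domain — there A's vacuous True (empty range)
-- and B's False (empty string repetition) are both accidental, equally defensible corner values.
def Pre_looks_shady (shadyStr : String) (partsCount : Int) : Prop := 1 ≤ partsCount
instance (shadyStr : String) (partsCount : Int) : Decidable (Pre_looks_shady shadyStr partsCount) := by unfold Pre_looks_shady; infer_instance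
def pvWitness_looks_shady : String × Int := ("abab", 2)

def Spec_looks_shady (shadyStr : String) (partsCount : Int) (out : Bool) : Prop := out = looks_shady_alt shadyStr partsCount
instance (shadyStr : String) (partsCount : Int) (out : Bool) : Decidable (Spec_looks_shady shadyStr partsCount out) := by unfold Spec_looks_shady; infer_instance

-- ===== CLAIM (what is proved, stated in full; the proofs are below) =====
def Claim_equal_looks_shady : Prop := ∀ (shadyStr : String) (partsCount : Int), Dom_looks_shady shadyStr partsCount → Pre_looks_shady shadyStr partsCount → Spec_looks_shady shadyStr partsCount (looks_shady shadyStr partsCount)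

-- ===== LEMMAS AND PROOFS =====

-- A's loop with early return is the conjunction of the per-chunk tests.
theorem looksShadyGo_eq_all (s : List Char) (partLen : Int) (firstPart : List Char)
    (l : List Int) :
    looksShadyGo s partLen firstPart l =
      l.all (fun i => firstPart == PySem.List.slice s (some (i * partLen)) (some ((i + 1) * partLen))) := by
  induction l with
  | nil => rfl
  | cons i rest ih =>
    simp only [looksShadyGo, List.all_cons, ih]
    by_cases h : firstPart = PySem.List.slice s (some (i * partLen)) (some ((i + 1) * partLen)) <;>
      simp [h]

-- Core fact: the first n p-chunks of s are all equal to the first one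
-- iff the first chunk repeated n times is the prefix of length p*n.
theorem flatten_replicate_take_iff (s : List Char) (p n : Nat) :
    ((List.replicate n (s.take p)).flatten = s.take (p * n)) ↔
      (∀ i < n, (s.drop (i * p)).take p = s.take p) := by
  induction n with
  | zero => simp
  | succ n ih =>
    have hrep : (List.replicate (n + 1) (s.take p)).flatten
        = (List.replicate n (s.take p)).flatten ++ s.take p := by
      simp [List.replicate_succ']
    have htake : s.take (p * (n + 1)) = s.take (p * n) ++ (s.drop (p * n)).take p := by
      rw [show p * (n + 1) = p * n + p by ring, List.take_add]
    constructor
    · intro h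
      have hlenF : ((List.replicate (n + 1) (s.take p)).flatten).length
          = (n + 1) * (min p s.length) := by
        simp [List.length_flatten]
      have hlenT : (s.take (p * (n + 1))).length = min (p * (n + 1)) s.length := by simp
      have hlen : (n + 1) * (min p s.length) = min (p * (n + 1)) s.length := by
        rw [← hlenF, ← hlenT, h]
      by_cases hp : p ≤ s.length
      · -- full chunks: min p len = p, and (n+1)*p ≤ len
        have hmin : min p s.length = p := Nat.min_eq_left hp
        have hle : p * (n + 1) ≤ s.length := by
          rcases Nat.le_total (p * (n + 1)) s.length with h' | h'
          · exact h'
          · rw [hmin, Nat.min_eq_right h'] at hlen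
            exact Nat.le_of_eq ((Nat.mul_comm p (n + 1)).trans hlen)
        have hle' : p * n + p ≤ s.length := by
          have hx : p * (n + 1) = p * n + p := by ring
          omega
        rw [hrep, htake] at h
        have hlf : (s.take p).length = ((s.drop (p * n)).take p).length := by
          simp
          omega
        obtain ⟨h1, h2⟩ := List.append_inj' h hlf
        intro i hi
        rcases Nat.lt_succ_iff_lt_or_eq.mp hi with hi' | rfl
        · exact (ih.mp h1) i hi'
        · rw [Nat.mul_comm] at h2; exact h2.symm
      · -- short string: s.take p = s, so the equality forces n = 0 or s = []
        have hp' : s.length < p := by omega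
        have hminr : min p s.length = s.length := by omega
        have hle2 : s.length ≤ p * (n + 1) := by
          calc s.length ≤ p := Nat.le_of_lt hp'
          _ ≤ p * (n + 1) := Nat.le_mul_of_pos_right p (by omega)
        have hminr2 : min (p * (n + 1)) s.length = s.length := by omega
        rw [hminr, hminr2] at hlen
        have hexp : (n + 1) * s.length = n * s.length + s.length := by ring
        have hzero : n = 0 ∨ s.length = 0 :=
          Nat.mul_eq_zero.mp (show n * s.length = 0 by omega)
        intro i hi
        rcases hzero with rfl | hs0
        · have : i = 0 := by omega
          subst this
          simp
        · have : s = [] := List.eq_nil_of_length_eq_zero hs0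
          simp [this]
    · intro h
      have h1 : (List.replicate n (s.take p)).flatten = s.take (p * n) :=
        ih.mpr (fun i hi => h i (Nat.lt_succ_of_lt hi))
      have h2 : (s.drop (n * p)).take p = s.take p := h n (Nat.lt_succ_self n)
      rw [hrep, htake, h1, Nat.mul_comm p n, h2]

-- Python slice s[(1+k)*p : (2+k)*p] for Nat p, k is drop-then-take.
theorem slice_chunk (s : List Char) (p k : Nat) :
    PySem.List.slice s (some ((1 + (k : Int)) * (p : Int))) (some ((1 + (k : Int) + 1) * (p : Int)))
      = (s.drop ((1 + k) * p)).take p := by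
  have e1 : (1 + (k : Int)) * (p : Int) = (((1 + k) * p : Nat) : Int) := by push_cast; ring
  have e2 : (1 + (k : Int) + 1) * (p : Int) = ((((1 + k) * p + p) : Nat) : Int) := by push_cast; ring
  rw [e1, e2, PySem.List.slice_natCast]
  have hsub : (1 + k) * p + p - (1 + k) * p = p := by omega
  rw [hsub]

-- Port A, for partsCount = n ≥ 1 and p the computed part length, is the all-chunks-equal test.
theorem looks_shady_eq (str : String) (n p : Nat) (hn : 1 ≤ n)
    (hp : str.toList.length / n = p) :
    looks_shady str (n : Int) =
      decide (∀ i < n, (str.toList.drop (i * p)).take p = str.toList.take p) := by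
  have hfd : PySem.Int.floordiv (PySem.Str.len str) (n : Int) = ((p : Nat) : Int) := by
    rw [PySem.Str.len_eq, ← hp]
    exact_mod_cast PySem.Int.floordiv_natCast str.toList.length n
  have hfirst : PySem.List.slice str.toList (some 0) (some ((p : Nat) : Int))
      = str.toList.take p := by
    rw [PySem.List.slice_zero_start, PySem.List.slice_to_natCast]
  unfold looks_shady
  rw [hfd]
  simp only [hfirst]
  rw [PySem.List.pyRange_one, looksShadyGo_eq_all, List.all_map]
  have hcast : ((n : Int) - 1).toNat = n - 1 := by omega
  rw [hcast]
  simp only [Function.comp_def, slice_chunk]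
  rw [Bool.eq_iff_iff, List.all_eq_true, decide_eq_true_iff]
  constructor
  · intro h i hi
    rcases Nat.eq_zero_or_pos i with rfl | hi1
    · simp
    · have hk : i - 1 ∈ List.range (n - 1) := by
        rw [List.mem_range]; omega
      have hb := h _ hk
      rw [beq_iff_eq] at hb
      have he : 1 + (i - 1) = i := by omega
      rw [he] at hb
      exact hb.symm
  · intro h k hk
    rw [List.mem_range] at hk
    rw [beq_iff_eq]
    exact (h (1 + k) (by omega)).symm

-- Port B, for partsCount = n ≥ 1 and p the computed part length, is the repeat-and-compare test.
theorem looks_shady_alt_eq (str : String) (n p : Nat) (hn : 1 ≤ n)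
    (hp : str.toList.length / n = p) :
    looks_shady_alt str (n : Int) =
      decide ((List.replicate n (str.toList.take p)).flatten = str.toList.take (p * n)) := by
  have hfd : PySem.Int.floordiv (PySem.Str.len str) (n : Int) = ((p : Nat) : Int) := by
    rw [PySem.Str.len_eq, ← hp]
    exact_mod_cast PySem.Int.floordiv_natCast str.toList.length n
  unfold looks_shady_alt
  rw [hfd]
  have htn : ((n : Int)).toNat = n := by omega
  have hmul : ((p : Nat) : Int) * (n : Int) = (((p * n) : Nat) : Int) := by push_cast; ring
  simp only [htn, hmul, PySem.List.slice_to_natCast]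
  rw [Bool.eq_iff_iff, beq_iff_eq, decide_eq_true_iff]

-- ===== VERDICT (by name: the statement is the Claim_ definition above) =====
theorem looks_shady_spec : Claim_equal_looks_shady := by
  intro str pc _ hpre
  unfold Spec_looks_shady
  unfold Pre_looks_shady at hpre
  obtain ⟨n, rfl⟩ : ∃ n : Nat, pc = (n : Int) := ⟨pc.toNat, by omega⟩
  have hn : 1 ≤ n := by exact_mod_cast hpre
  rw [looks_shady_eq str n (str.toList.length / n) hn rfl,
      looks_shady_alt_eq str n (str.toList.length / n) hn rfl]
  simp only [decide_eq_decide]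
  exact (flatten_replicate_take_iff str.toList (str.toList.length / n) n).symm
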